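-- pv_equiv track=rewrite | github.com/xjtubmy/mistake-notebook | scripts/lint-wiki.py | find_all_links
-- ===== SOURCE A (Python) =====
-- def find_all_links(content: str) -> set:
--     """找出文件中所有的 wiki 链接 [[xxx]]"""
--     links = set()
--     for line in content.split('\n'):
--         # 匹配 [[xxx]] 或 [[xxx|yyy]]
--         start = 0
--         while True:
--             pos = line.find('[[', start)
--             if pos == -1:
--                 break
--             end = line.find(']]', pos)
--             if end == -1:
--                 break
--             link = line[pos+2:end]
--             # 处理 [[xxx|yyy]] 格式
--             if '|' in link:
--                 link = link.split('|')[0]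
--             links.add(link.strip())
--             start = end + 2
--     return links
-- ===== SOURCE B (Python) =====
-- import re
--
-- _LINK_RE = re.compile(r'\[\[(.*?)\]\]')
--
-- def find_all_links(content: str) -> set:
--     """找出文件中所有的 wiki 链接 [[xxx]]"""
--     return {m.group(1).split('|')[0].strip() for m in _LINK_RE.finditer(content)}
-- ===== Notes on version B (the rewrite author's own statement) =====
-- stated objective: idiomatic
-- what changed: Replaced the per-line find('[['), find(']]') cursor-advancing while-loop with a single regex pass over the whole text: a set comprehension over re.finditer(r'\[\[(.*?)\]\]', content) (non-greedy, no DOTALL, so a match never crosses a line), taking group(1).split('|')[0].strip() for each match.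
import Mathlib
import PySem

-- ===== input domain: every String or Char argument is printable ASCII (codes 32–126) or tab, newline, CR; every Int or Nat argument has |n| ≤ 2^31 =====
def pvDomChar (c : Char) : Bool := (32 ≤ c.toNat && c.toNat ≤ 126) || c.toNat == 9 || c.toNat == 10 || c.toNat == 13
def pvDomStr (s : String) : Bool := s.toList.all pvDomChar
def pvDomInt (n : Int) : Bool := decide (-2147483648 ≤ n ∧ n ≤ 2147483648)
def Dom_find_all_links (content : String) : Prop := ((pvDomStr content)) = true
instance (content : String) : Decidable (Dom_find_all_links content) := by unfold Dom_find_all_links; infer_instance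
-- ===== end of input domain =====

-- B replaces A's per-line find/while index scanning by a single regex pass
-- (re.finditer(r'\[\[(.*?)\]\]') over the whole text) feeding a set comprehension; objective: idiomatic.

-- ===== PORT A =====
-- A's `while True` loop over the int cursor `start`; the cursor strictly grows each
-- iteration, so `line length + 1` fuel is more than the loop can ever use.
def aLinkLoop (line : String) (links : PySem.Set String) (start : Int) : Nat → PySem.Set String
  | 0 => links
  | fuel + 1 =>
    let pos := PySem.Str.findFrom line "[[" start
    if pos = -1 then links
    else
      let e := PySem.Str.findFrom line "]]" pos
      if e = -1 then links
      else
        let link := PySem.Str.slice line (some (pos + 2)) (some e)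
        let link := if PySem.Str.isIn "|" link then ((PySem.Str.split? link "|").getD []).headD "" else link
        aLinkLoop line (PySem.Set.add links (PySem.Str.strip link)) (e + 2) fuel

def find_all_links (content : String) : List String :=
  ((PySem.Str.split? content "\n").getD []).foldl
    (fun links line => aLinkLoop line links 0 (line.toList.length + 1)) PySem.Set.empty

-- ===== PORT B =====
-- Hand-port of Source B's re.finditer(r'\[\[(.*?)\]\]', content) (no DOTALL): after a literal '[[',
-- the non-greedy `.*?]]` captures up to the FIRST ']]', `.` refusing '\n'; a failed attempt makes
-- the engine retry one position further right; every match consumes >= 4 chars, so the engine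
-- resumes exactly at the match end.  Exact on all inputs.
def bGroup (acc : List Char) : List Char → Option (List Char × List Char)
  | [] => none
  | c :: rest =>
    if c = ']' ∧ rest.head? = some ']' then some (acc.reverse, rest.tail)
    else if c = '\n' then none
    else bGroup (c :: acc) rest

-- needed by bScan's termination: a successful match consumes at least the closing ']]'
theorem bGroup_some_length (acc l : List Char) (lk r : List Char)
    (h : bGroup acc l = some (lk, r)) : r.length < l.length := by
  induction l generalizing acc with
  | nil => simp [bGroup] at h
  | cons c rest ih =>
    rw [bGroup] at h
    split_ifs at h with h1 h2
    · obtain ⟨-, h1⟩ := h1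
      cases rest with
      | nil => simp at h1
      | cons c2 r2 =>
        simp at h
        obtain ⟨-, rfl⟩ := h
        simp
    · exact Nat.lt_succ_of_lt (ih _ h)

def bScan : List Char → List (List Char)
  | [] => []
  | c :: rest =>
    if c = '[' ∧ rest.head? = some '[' then
      match h : bGroup [] rest.tail with
      | some (lk, rest') => lk :: bScan rest'
      | none => bScan rest        -- retry at the next position: rest = '[' :: rest.tail
    else bScan rest
termination_by l => l.length
decreasing_by
  · have h2 := bGroup_some_length [] rest.tail lk rest' h
    have : rest.tail.length ≤ rest.length := by simp [List.length_tail]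
    simp; omega
  · simp
  · simp

def find_all_links_alt (content : String) : List String :=
  (bScan content.toList).foldl
    (fun links m =>
      -- m.group(1).split('|')[0] = the chars of the capture before its first '|'; exact
      PySem.Set.add links (String.ofList (PySem.Chars.strip (m.takeWhile (· ≠ '|'))))) PySem.Set.empty

-- ===== PRECONDITION & SPEC =====
def Spec_find_all_links (content : String) (out : List String) : Prop := out = find_all_links_alt content
instance (content : String) (out : List String) : Decidable (Spec_find_all_links content out) := by unfold Spec_find_all_links; infer_instance

-- ===== CLAIM (what is proved, stated in full; the proofs are below) =====
def Claim_equal_find_all_links : Prop := ∀ (content : String), Dom_find_all_links content → Spec_find_all_links content (find_all_links content)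

-- ===== LEMMAS AND PROOFS =====

-- the fold step shared by both sides once A's link processing is normalised
def pvAdd (L : PySem.Set String) (m : List Char) : PySem.Set String :=
  PySem.Set.add L (String.ofList (PySem.Chars.strip (m.takeWhile (· ≠ '|'))))

-- structural description of Python's str.split(sep) for a one-char separator
def pySplit (c : Char) (s : List Char) : List (List Char) :=
  match h : s.dropWhile (· ≠ c) with
  | [] => [s]
  | _ :: rest => s.takeWhile (· ≠ c) :: pySplit c rest
termination_by s.length
decreasing_by
  have h2 : (s.dropWhile (· ≠ c)).length ≤ s.length := List.length_dropWhile_le _ _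
  rw [h] at h2; simp at h2 ⊢; omega

theorem head_dropWhile_eq (cc : Char) (l : List Char) (c : Char) (r : List Char)
    (h : l.dropWhile (· ≠ cc) = c :: r) : c = cc := by
  induction l with
  | nil => simp at h
  | cons a t ih =>
    rw [List.dropWhile_cons] at h
    split_ifs at h with ha
    · exact ih h
    · simp at ha; cases h; omega

theorem pySplit_ne_nil (c : Char) (s : List Char) : pySplit c s ≠ [] := by
  rw [pySplit]
  split <;> simp

theorem pySplit_head (c : Char) (s : List Char) :
    (pySplit c s).headD [] = s.takeWhile (· ≠ c) := by
  rw [pySplit]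
  split
  · next h =>
      exact (List.takeWhile_eq_self_iff.mpr (fun x hx => List.dropWhile_eq_nil_iff.mp h x hx)).symm
  · simp

theorem pySplit_reconstruct (c : Char) (s : List Char) :
    (pySplit c s).headD [] :: (pySplit c s).tail = pySplit c s := by
  cases h : pySplit c s with
  | nil => exact absurd h (pySplit_ne_nil c s)
  | cons a t => simp

theorem pySplit_cons_sep (c : Char) (rest : List Char) :
    pySplit c (c :: rest) = [] :: pySplit c rest := by
  have hdw : List.dropWhile (· ≠ c) (c :: rest) = c :: rest := by
    simp
  rw [pySplit]
  split
  · next h2 => rw [hdw] at h2; cases h2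
  · next x r2 h2 =>
    rw [hdw] at h2
    injection h2 with h3 h4
    subst h4
    simp

theorem pySplit_cons_ne (c c0 : Char) (rest : List Char) (h : ¬ c0 = c) :
    pySplit c (c0 :: rest) = (c0 :: (pySplit c rest).headD []) :: (pySplit c rest).tail := by
  have hdw : List.dropWhile (· ≠ c) (c0 :: rest) = List.dropWhile (· ≠ c) rest := by
    simp [h]
  have htw : List.takeWhile (· ≠ c) (c0 :: rest) = c0 :: List.takeWhile (· ≠ c) rest := by
    simp [h]
  rw [pySplit]
  split
  · next h2 =>
    rw [hdw] at h2
    rw [pySplit]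
    split
    · next h3 => simp
    · next y r3 h3 => rw [h2] at h3; cases h3
  · next x r2 h2 =>
    rw [hdw] at h2
    rw [htw]
    conv_rhs => rw [pySplit]
    split
    · next h3 => rw [h2] at h3; cases h3
    · next y r3 h3 =>
      rw [h2] at h3
      injection h3 with h4 h5
      subst h5
      simp

theorem pySplit_mem_aux (c : Char) : ∀ (n : Nat) (s : List Char), s.length ≤ n →
    ∀ p ∈ pySplit c s, c ∉ p := by
  intro n
  induction n with
  | zero =>
    intro s hs p hp
    have : s = [] := by cases s <;> simp_all
    subst this
    rw [pySplit] at hp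
    split at hp
    · simp at hp; subst hp; simp
    · next x r2 h2 => simp at h2
  | succ n ih =>
    intro s hs p hp
    rw [pySplit] at hp
    split at hp
    · next h2 =>
      simp at hp
      subst hp
      intro hc
      have := List.dropWhile_eq_nil_iff.mp h2 c hc
      simp at this
    · next x r2 h2 =>
      simp at hp
      rcases hp with rfl | hp
      · intro hc
        have := List.mem_takeWhile_imp hc
        simp at this
      · have hlen : (s.dropWhile (· ≠ c)).length ≤ s.length := List.length_dropWhile_le _ _
        rw [h2] at hlen
        simp at hlen
        exact ih r2 (by omega) p hp

theorem pySplit_mem (c : Char) (s : List Char) (p : List Char) (hp : p ∈ pySplit c s) : c ∉ p :=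
  pySplit_mem_aux c s.length s le_rfl p hp

theorem splitOn_go_eq (c : Char) (fuel : Nat) (l cur : List Char)
    (h : l.length < fuel) (acc' : List (List Char)) :
    PySem.Chars.splitOn.go [c] fuel l cur acc' =
      acc'.reverse ++ (cur.reverse ++ (pySplit c l).headD []) :: (pySplit c l).tail := by
  induction fuel generalizing l cur acc' with
  | zero => omega
  | succ fuel ih =>
    cases l with
    | nil =>
      rw [PySem.Chars.splitOn.go.eq_2 _ _ _ _ (by omega), pySplit]
      simp
    | cons c0 rest =>
      rw [PySem.Chars.splitOn.go.eq_3]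
      by_cases hc : c0 = c
      · subst hc
        rw [if_pos (by simp [List.isPrefixOf])]
        have hdrop : List.drop ([c0].length) (c0 :: rest) = rest := by simp
        rw [hdrop, ih rest [] (by simp at h; omega) (cur.reverse :: acc'), pySplit_cons_sep]
        rw [← pySplit_reconstruct c0 rest]
        simp
      · rw [if_neg (by simp [List.isPrefixOf]; intro hcc; exact absurd hcc.symm hc)]
        rw [ih rest (c0 :: cur) (by simp at h; omega) acc', pySplit_cons_ne c c0 rest hc]
        simp

theorem splitOn_eq (c : Char) (s : List Char) :
    PySem.Chars.splitOn s [c] = pySplit c s := by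
  rw [PySem.Chars.splitOn, splitOn_go_eq c (s.length + 1) s [] (by omega) []]
  simpa using pySplit_reconstruct c s

theorem bScan_nil : bScan [] = [] := by rw [bScan]

theorem bScan_cons_not (c : Char) (rest : List Char) (h : ¬ (c = '[' ∧ rest.head? = some '[')) :
    bScan (c :: rest) = bScan rest := by
  rw [bScan, if_neg h]

theorem bScan_cons_some (rest lk rest' : List Char) (hh : rest.head? = some '[')
    (hg : bGroup [] rest.tail = some (lk, rest')) : bScan ('[' :: rest) = lk :: bScan rest' := by
  rw [bScan, if_pos ⟨rfl, hh⟩]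
  split
  · next lk2 r2 h2 => rw [hg] at h2; injection h2 with h3; cases h3; rfl
  · next h2 => rw [hg] at h2; cases h2

theorem bScan_cons_none (rest : List Char) (hh : rest.head? = some '[')
    (hg : bGroup [] rest.tail = none) : bScan ('[' :: rest) = bScan rest := by
  rw [bScan, if_pos ⟨rfl, hh⟩]
  split
  · next lk2 r2 h2 => rw [hg] at h2; cases h2
  · rfl

theorem bGroup_none (acc u : List Char) (h : ¬ [']', ']'] <:+: u) : bGroup acc u = none := by
  induction u generalizing acc with
  | nil => rfl
  | cons c rest ih =>
    rw [bGroup]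
    split_ifs with h1 h2
    · exfalso
      obtain ⟨rfl, h1⟩ := h1
      cases rest with
      | nil => simp at h1
      | cons c2 r2 =>
        simp at h1
        subst h1
        exact h ⟨[], r2, rfl⟩
    · rfl
    · exact ih (c :: acc) (fun h3 => h (h3.trans (List.suffix_cons c rest).isInfix))

theorem bGroup_some (j : Nat) : ∀ (u acc : List Char), '\n' ∉ u →
    [']', ']'] <+: u.drop j → (∀ i < j, ¬ [']', ']'] <+: u.drop i) →
    bGroup acc u = some (acc.reverse ++ u.take j, u.drop (j + 2)) := by
  induction j with
  | zero =>
    intro u acc hnl hpre _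
    rw [List.drop_zero] at hpre
    obtain ⟨t, rfl⟩ := hpre
    rw [show ([']', ']'] ++ t : List Char) = ']' :: ']' :: t from rfl, bGroup]
    simp
  | succ j ih =>
    intro u acc hnl hpre hmin
    have h0 : ¬ [']', ']'] <+: u := by simpa using hmin 0 (Nat.succ_pos j)
    cases u with
    | nil => simp at hpre
    | cons c rest =>
      have hcnl : ¬ c = '\n' := fun hc => hnl (hc ▸ List.mem_cons_self)
      rw [bGroup]
      rw [if_neg (by
        rintro ⟨rfl, hh⟩
        cases rest with
        | nil => simp at hh
        | cons c2 r2 => simp at hh; subst hh; exact h0 ⟨r2, rfl⟩)]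
      rw [if_neg hcnl]
      rw [ih rest (c :: acc) (fun hm => hnl (List.mem_cons_of_mem c hm))
        (by simpa using hpre)
        (fun i hi => by simpa using hmin (i + 1) (by omega))]
      simp

theorem bGroup_append_none (m r : List Char) : ∀ (acc : List Char), '\n' ∉ m →
    bGroup acc m = none → bGroup acc (m ++ '\n' :: r) = none := by
  induction m with
  | nil =>
    intro acc _ _
    rw [List.nil_append, bGroup]
    rw [if_neg (by rintro ⟨h1, -⟩; cases h1)]
    simp
  | cons c rest ih =>
    intro acc hnl h
    have hcnl : ¬ c = '\n' := fun hc => hnl (hc ▸ List.mem_cons_self)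
    rw [bGroup] at h
    split_ifs at h with h1
    rw [List.cons_append, bGroup]
    rw [if_neg (by
      rintro ⟨rfl, hh⟩
      apply h1
      refine ⟨rfl, ?_⟩
      cases rest with
      | nil => simp at hh
      | cons c2 r2 => simpa using hh)]
    rw [if_neg hcnl]
    exact ih (c :: acc) (fun hm => hnl (List.mem_cons_of_mem c hm)) h

theorem bGroup_append_some (m r : List Char) : ∀ (acc lk rest' : List Char),
    bGroup acc m = some (lk, rest') →
    bGroup acc (m ++ '\n' :: r) = some (lk, rest' ++ '\n' :: r) := by
  induction m with
  | nil => intro acc lk rest' h; cases h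
  | cons c rest ih =>
    intro acc lk rest' h
    by_cases hcnl : c = '\n'
    · subst hcnl
      rw [bGroup] at h
      rw [if_neg (by rintro ⟨h1, -⟩; cases h1)] at h
      simp at h
    · rw [bGroup] at h
      split_ifs at h with h1
      · obtain ⟨rfl, hh⟩ := h1
        cases rest with
        | nil => simp at hh
        | cons c2 r2 =>
          simp at hh
          subst hh
          simp at h
          obtain ⟨rfl, rfl⟩ := h
          rw [List.cons_append, List.cons_append, bGroup]
          simp
      · rw [List.cons_append, bGroup]
        rw [if_neg (by
          rintro ⟨rfl, hh⟩
          apply h1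
          refine ⟨rfl, ?_⟩
          cases rest with
          | nil => simp at hh
          | cons c2 r2 => simpa using hh)]
        rw [if_neg hcnl]
        exact ih (c :: acc) lk rest' h

theorem bGroup_some_suffix (l : List Char) : ∀ (acc lk r : List Char),
    bGroup acc l = some (lk, r) → r <:+ l := by
  induction l with
  | nil => intro acc lk r h; cases h
  | cons c rest ih =>
    intro acc lk r h
    rw [bGroup] at h
    split_ifs at h with h1 h2
    · obtain ⟨rfl, hh⟩ := h1
      cases rest with
      | nil => simp at hh
      | cons c2 r2 =>
        simp at hh
        subst hh
        simp at h
        obtain ⟨-, rfl⟩ := h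
        exact (List.suffix_cons ']' r2).trans (List.suffix_cons ']' (']' :: r2))
    · exact (ih (c :: acc) lk r h).trans (List.suffix_cons c rest)


theorem bScan_nil_of_no_open (t : List Char) (h : ¬ ['[', '['] <:+: t) : bScan t = [] := by
  induction t with
  | nil => exact bScan_nil
  | cons c rest ih =>
    rw [bScan_cons_not c rest (by
      rintro ⟨rfl, hh⟩
      cases rest with
      | nil => simp at hh
      | cons c2 r2 =>
        simp at hh
        subst hh
        exact h ⟨[], r2, rfl⟩)]
    exact ih (fun h3 => h (h3.trans (List.suffix_cons c rest).isInfix))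

theorem bScan_nil_of_no_close_aux : ∀ (n : Nat) (t : List Char), t.length ≤ n →
    (∀ q, ['[', '['] <+: t.drop q → ¬ [']', ']'] <:+: t.drop (q + 2)) → bScan t = [] := by
  intro n
  induction n with
  | zero =>
    intro t ht _
    have ht0 : t = [] := by cases t <;> simp_all
    subst ht0
    exact bScan_nil
  | succ n ih =>
    intro t ht h
    cases t with
    | nil => exact bScan_nil
    | cons c rest =>
      by_cases hop : c = '[' ∧ rest.head? = some '['
      · obtain ⟨rfl, hh⟩ := hop
        cases rest with
        | nil => simp at hh
        | cons c2 r2 =>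
          simp at hh
          subst hh
          have hnc : ¬ [']', ']'] <:+: r2 := by simpa using h 0 ⟨r2, rfl⟩
          rw [bScan_cons_none ('[' :: r2) (by simp) (bGroup_none [] r2 hnc)]
          exact ih ('[' :: r2) (by simp at ht ⊢; omega) (fun q hq => by
            simpa using h (q + 1) (by simpa using hq))
      · rw [bScan_cons_not c rest hop]
        exact ih rest (by simp at ht; omega) (fun q hq => by
          simpa using h (q + 1) (by simpa using hq))

theorem bScan_nil_of_no_close (t : List Char)
    (h : ∀ q, ['[', '['] <+: t.drop q → ¬ [']', ']'] <:+: t.drop (q + 2)) : bScan t = [] :=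
  bScan_nil_of_no_close_aux t.length t le_rfl h

theorem bScan_eq_cons (t : List Char) (p j : Nat) (hnl : '\n' ∉ t)
    (hp : ['[', '['] <+: t.drop p) (hpmin : ∀ i < p, ¬ ['[', '['] <+: t.drop i)
    (hj : [']', ']'] <+: (t.drop (p + 2)).drop j)
    (hjmin : ∀ i < j, ¬ [']', ']'] <+: (t.drop (p + 2)).drop i) :
    bScan t = (t.drop (p + 2)).take j :: bScan ((t.drop (p + 2)).drop (j + 2)) := by
  induction p generalizing t with
  | zero =>
    obtain ⟨u, hu⟩ : ∃ u, t = '[' :: '[' :: u := by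
      rw [List.drop_zero] at hp
      obtain ⟨w, hw⟩ := hp
      exact ⟨w, hw.symm⟩
    subst hu
    simp only [List.drop_succ_cons, List.drop_zero] at hj hjmin ⊢
    have hg := bGroup_some j u [] (fun hm => hnl (by simp [hm])) hj hjmin
    rw [bScan_cons_some ('[' :: u) (u.take j) (u.drop (j + 2)) (by simp) (by simpa using hg)]
  | succ p ih =>
    have h0 : ¬ ['[', '['] <+: t := hpmin 0 (Nat.succ_pos p)
    cases t with
    | nil => simp at hp
    | cons c rest =>
      rw [bScan_cons_not c rest (by
        rintro ⟨rfl, hh⟩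
        cases rest with
        | nil => simp at hh
        | cons c2 r2 => simp at hh; subst hh; exact h0 ⟨r2, rfl⟩)]
      simp only [List.drop_succ_cons] at hp hj hjmin ⊢
      exact ih rest (fun hm => hnl (List.mem_cons_of_mem c hm)) hp
        (fun i hi => by simpa using hpmin (i + 1) (by omega)) hj hjmin

theorem bScan_append_aux (r : List Char) : ∀ (n : Nat) (a : List Char), a.length ≤ n →
    '\n' ∉ a → bScan (a ++ '\n' :: r) = bScan a ++ bScan r := by
  intro n
  induction n with
  | zero =>
    intro a ha _
    have ha0 : a = [] := by cases a <;> simp_all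
    subst ha0
    rw [List.nil_append, bScan_nil, bScan_cons_not '\n' r (by rintro ⟨h1, -⟩; cases h1)]
    simp
  | succ n ih =>
    intro a ha hnl
    cases a with
    | nil =>
      rw [List.nil_append, bScan_nil, bScan_cons_not '\n' r (by rintro ⟨h1, -⟩; cases h1)]
      simp
    | cons c rest =>
      by_cases hop : c = '[' ∧ rest.head? = some '['
      · obtain ⟨rfl, hh⟩ := hop
        cases rest with
        | nil => simp at hh
        | cons c2 r2 =>
          simp at hh
          subst hh
          have hnl2 : '\n' ∉ r2 := fun hm => hnl (by simp [hm])
          cases hb : bGroup [] r2 with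
          | some v =>
            obtain ⟨lk, rest'⟩ := v
            have hlen := bGroup_some_length [] r2 lk rest' hb
            have hsub := bGroup_some_suffix r2 [] lk rest' hb
            have hnl3 : '\n' ∉ rest' := fun hm => hnl2 (hsub.subset hm)
            rw [List.cons_append, List.cons_append]
            rw [bScan_cons_some ('[' :: (r2 ++ '\n' :: r)) lk (rest' ++ '\n' :: r) (by simp)
              (by simpa using bGroup_append_some r2 r [] lk rest' hb)]
            rw [bScan_cons_some ('[' :: r2) lk rest' (by simp) (by simpa using hb)]
            rw [ih rest' (by simp at ha; omega) hnl3]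
            simp
          | none =>
            rw [List.cons_append, List.cons_append]
            rw [bScan_cons_none ('[' :: (r2 ++ '\n' :: r)) (by simp)
              (by simpa using bGroup_append_none r2 r [] hnl2 hb)]
            rw [bScan_cons_none ('[' :: r2) (by simp) (by simpa using hb)]
            rw [show '[' :: (r2 ++ '\n' :: r) = ('[' :: r2) ++ '\n' :: r from rfl]
            exact ih ('[' :: r2) (by simp at ha ⊢; omega) (fun hm => hnl (by simp at hm; simp [hm]))
      · rw [List.cons_append]
        rw [bScan_cons_not c (rest ++ '\n' :: r) (by
          rintro ⟨rfl, hh⟩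
          apply hop
          refine ⟨rfl, ?_⟩
          cases rest with
          | nil => simp at hh
          | cons c2 r2 => simpa using hh)]
        rw [bScan_cons_not c rest hop]
        exact ih rest (by simp at ha; omega) (fun hm => hnl (List.mem_cons_of_mem c hm))

theorem bScan_append (a r : List Char) (hnl : '\n' ∉ a) :
    bScan (a ++ '\n' :: r) = bScan a ++ bScan r :=
  bScan_append_aux r a.length a le_rfl hnl

theorem proc_eq (cs : List Char) :
    PySem.Str.strip (if PySem.Str.isIn "|" (String.ofList cs) then
        ((PySem.Str.split? (String.ofList cs) "|").getD []).headD "" else String.ofList cs)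
      = String.ofList (PySem.Chars.strip (cs.takeWhile (· ≠ '|'))) := by
  refine String.toList_inj.mp ?_
  by_cases hin : '|' ∈ cs
  · rw [if_pos (by
      rw [PySem.Str.isIn_iff_infix]
      simpa using (List.singleton_infix_iff '|' cs).mpr hin)]
    have hsp : PySem.Str.split? (String.ofList cs) "|" = some ((pySplit '|' cs).map String.ofList) := by
      simp [PySem.Str.split?, PySem.Chars.split?, splitOn_eq]
    rw [hsp, Option.getD_some]
    have hhd : ((pySplit '|' cs).map String.ofList).headD "" = String.ofList (cs.takeWhile (· ≠ '|')) := by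
      cases hps : pySplit '|' cs with
      | nil => exact absurd hps (pySplit_ne_nil '|' cs)
      | cons a t =>
        have := pySplit_head '|' cs
        rw [hps] at this
        simp at this
        simp [this]
    rw [hhd]
    simp [PySem.Str.toList_strip]
  · rw [if_neg (by
      rw [PySem.Str.isIn_iff_infix]
      intro hif
      exact hin ((List.singleton_infix_iff '|' cs).mp (by simpa using hif)))]
    rw [List.takeWhile_eq_self_iff.mpr (fun x hx => by
      simp
      rintro rfl
      exact hin hx)]
    simp [PySem.Str.toList_strip]

theorem aLoop_eq (s : List Char) (hnl : '\n' ∉ s) :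
    ∀ (fuel k : Nat) (links : PySem.Set String), k ≤ s.length → s.length - k < fuel →
      aLinkLoop (String.ofList s) links (k : Int) fuel = (bScan (s.drop k)).foldl pvAdd links := by
  intro fuel
  induction fuel with
  | zero => intro k links hk hf; omega
  | succ fuel ih =>
    intro k links hk hf
    simp only [aLinkLoop, PySem.Str.findFrom_eq, String.toList_ofList,
      show ("[[" : String).toList = ['[', '['] from rfl,
      show ("]]" : String).toList = [']', ']'] from rfl]
    rw [PySem.Chars.findFrom_natCast s ['[', '['] k hk]
    by_cases hfind : PySem.Chars.find (s.drop k) ['[', '['] = -1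
    · rw [if_pos hfind, if_pos rfl,
        bScan_nil_of_no_open _ ((PySem.Chars.find_eq_neg_one_iff _ _).mp hfind)]
      simp
    · rw [if_neg hfind]
      have hf0 : 0 ≤ PySem.Chars.find (s.drop k) ['[', '['] := by
        have := PySem.Chars.neg_one_le_find (s.drop k) ['[', '[']
        omega
      obtain ⟨F, hFn⟩ : ∃ F : Nat, PySem.Chars.find (s.drop k) ['[', '['] = (F : Int) :=
        ⟨(PySem.Chars.find (s.drop k) ['[', '[']).toNat, (Int.toNat_of_nonneg hf0).symm⟩
      have spec := PySem.Chars.find_spec (s := s.drop k) (sub := ['[', '[']) hf0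
      rw [hFn] at spec
      simp only [Int.toNat_natCast] at spec
      have hpre : ['[', '['] <+: List.drop (k + F) s := by
        have := spec.1
        rwa [List.drop_drop] at this
      have hPle : k + F + 2 ≤ s.length := by
        have := hpre.length_le
        simp at this
        omega
      rw [hFn, show (k : Int) + (F : Int) = ((k + F : Nat) : Int) by push_cast; ring]
      rw [if_neg (by omega)]
      rw [PySem.Chars.findFrom_natCast s [']', ']'] (k + F) (by omega)]
      by_cases hgf : PySem.Chars.find (s.drop (k + F)) [']', ']'] = -1
      · rw [if_pos hgf, if_pos rfl]
        have hno : ∀ q, ['[', '['] <+: (s.drop k).drop q → ¬ [']', ']'] <:+: (s.drop k).drop (q + 2) := by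
          intro q hq hr
          rcases lt_or_ge q F with hlt | hge
          · exact spec.2 q hlt hq
          · have h1 : (s.drop k).drop (q + 2) = (s.drop (k + F)).drop (q + 2 - F) := by
              rw [List.drop_drop, List.drop_drop]
              congr 1
              omega
            rw [h1] at hr
            exact (PySem.Chars.find_eq_neg_one_iff _ _).mp hgf
              (hr.trans (List.drop_suffix _ _).isInfix)
        rw [bScan_nil_of_no_close _ hno]
        simp
      · rw [if_neg hgf]
        have hg0 : 0 ≤ PySem.Chars.find (s.drop (k + F)) [']', ']'] := by
          have := PySem.Chars.neg_one_le_find (s.drop (k + F)) [']', ']']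
          omega
        obtain ⟨G, hGn⟩ : ∃ G : Nat, PySem.Chars.find (s.drop (k + F)) [']', ']'] = (G : Int) :=
          ⟨(PySem.Chars.find (s.drop (k + F)) [']', ']']).toNat, (Int.toNat_of_nonneg hg0).symm⟩
        have gspec := PySem.Chars.find_spec (s := s.drop (k + F)) (sub := [']', ']']) hg0
        rw [hGn] at gspec
        simp only [Int.toNat_natCast] at gspec
        obtain ⟨w, hw⟩ : ∃ w, List.drop (k + F) s = '[' :: '[' :: w := by
          obtain ⟨t, ht⟩ := hpre
          exact ⟨t, ht.symm⟩
        have hG2 : 2 ≤ G := by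
          by_contra hG
          push Not at hG
          interval_cases G
          · have := gspec.1
            rw [List.drop_zero, hw] at this
            simp [List.cons_prefix_cons] at this
          · have := gspec.1
            rw [hw] at this
            simp [List.cons_prefix_cons] at this
        have hEle : k + F + G + 2 ≤ s.length := by
          have := gspec.1.length_le
          simp at this
          omega
        have hw2 : List.drop (k + F + 2) s = w := by
          have : List.drop 2 (List.drop (k + F) s) = w := by rw [hw]; rfl
          rwa [List.drop_drop] at this
        rw [hGn, show ((k + F : Nat) : Int) + (G : Int) = ((k + F + G : Nat) : Int) by push_cast; ring]
        rw [if_neg (by omega)]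
        rw [show ((k + F : Nat) : Int) + 2 = ((k + F + 2 : Nat) : Int) by push_cast; ring]
        have hslice : PySem.Str.slice (String.ofList s) (some ((k + F + 2 : Nat) : Int))
            (some ((k + F + G : Nat) : Int)) = String.ofList (w.take (G - 2)) := by
          refine String.toList_inj.mp ?_
          simp only [PySem.Str.toList_slice, PySem.Chars.slice_eq_listSlice, String.toList_ofList]
          rw [PySem.List.slice_natCast, hw2]
          congr 1
          omega
        rw [hslice, proc_eq]
        rw [show ((k + F + G : Nat) : Int) + 2 = ((k + F + G + 2 : Nat) : Int) by push_cast; ring]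
        rw [ih (k + F + G + 2) _ (by omega) (by omega)]
        have hj : [']', ']'] <+: ((s.drop k).drop (F + 2)).drop (G - 2) := by
          rw [show ((s.drop k).drop (F + 2)).drop (G - 2) = List.drop G (List.drop (k + F) s) by
            rw [List.drop_drop, List.drop_drop, List.drop_drop]; congr 1; omega]
          exact gspec.1
        have hjmin : ∀ i < G - 2, ¬ [']', ']'] <+: ((s.drop k).drop (F + 2)).drop i := by
          intro i hi hcon
          apply gspec.2 (i + 2) (by omega)
          rw [show List.drop (i + 2) (List.drop (k + F) s) = ((s.drop k).drop (F + 2)).drop i by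
            rw [List.drop_drop, List.drop_drop, List.drop_drop]; congr 1; omega]
          exact hcon
        rw [bScan_eq_cons (s.drop k) F (G - 2)
          (fun hm => hnl (List.mem_of_mem_drop hm))
          (by rw [show (s.drop k).drop F = s.drop (k + F) by rw [List.drop_drop]]
              exact hpre)
          (fun i hi => spec.2 i hi)
          hj hjmin]
        rw [List.foldl_cons]
        have harg : ((s.drop k).drop (F + 2)).take (G - 2) = w.take (G - 2) := by
          rw [show (s.drop k).drop (F + 2) = s.drop (k + F + 2) by
            rw [List.drop_drop, ← Nat.add_assoc], hw2]
        have harg2 : ((s.drop k).drop (F + 2)).drop (G - 2 + 2) = s.drop (k + F + G + 2) := by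
          rw [List.drop_drop, List.drop_drop]
          congr 1
          omega
        rw [harg, harg2]
        rfl

theorem total_eq_aux : ∀ (n : Nat) (s : List Char), s.length ≤ n → ∀ (init : PySem.Set String),
    (pySplit '\n' s).foldl (fun L p => (bScan p).foldl pvAdd L) init = (bScan s).foldl pvAdd init := by
  intro n
  induction n with
  | zero =>
    intro s hs init
    have hs0 : s = [] := by cases s <;> simp_all
    subst hs0
    rw [pySplit]
    simp [bScan_nil]
  | succ n ih =>
    intro s hs init
    rw [pySplit]
    split
    · next hdw => simp
    · next x rest hdw =>
      have hx : x = '\n' := head_dropWhile_eq '\n' s x rest hdw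
      subst hx
      have hlen : (s.dropWhile (· ≠ '\n')).length ≤ s.length := List.length_dropWhile_le _ _
      rw [hdw] at hlen
      simp at hlen
      have hnla : '\n' ∉ s.takeWhile (· ≠ '\n') := fun hm => by
        have := List.mem_takeWhile_imp hm
        simp at this
      have hsplit : s = s.takeWhile (· ≠ '\n') ++ '\n' :: rest := by
        conv_lhs => rw [← List.takeWhile_append_dropWhile (p := (· ≠ '\n')) (l := s), hdw]
      rw [List.foldl_cons]
      rw [ih rest (by omega) ((bScan (s.takeWhile (· ≠ '\n'))).foldl pvAdd init)]
      conv_rhs => rw [hsplit]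
      rw [bScan_append _ rest hnla, List.foldl_append]

theorem total_eq (s : List Char) (init : PySem.Set String) :
    (pySplit '\n' s).foldl (fun L p => (bScan p).foldl pvAdd L) init = (bScan s).foldl pvAdd init :=
  total_eq_aux s.length s le_rfl init


-- ===== VERDICT (by name: the statement is the Claim_ definition above) =====
theorem find_all_links_spec : Claim_equal_find_all_links := by
  intro content _
  unfold Spec_find_all_links find_all_links find_all_links_alt
  have hsplit : (PySem.Str.split? content "\n").getD [] =
      (pySplit '\n' content.toList).map String.ofList := by
    simp [PySem.Str.split?, PySem.Chars.split?, splitOn_eq]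
  rw [hsplit, List.foldl_map]
  rw [PySem.List.foldl_congr_mem _ _
    (fun L p => (bScan p).foldl pvAdd L) _
    (by
      intro L p hp
      have hnl : '\n' ∉ p := pySplit_mem '\n' content.toList p hp
      have h0 := aLoop_eq p hnl (p.length + 1) 0 L (by omega) (by omega)
      simpa using h0)]
  rw [total_eq]
  rfl
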